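-- pv_equiv track=rewrite | github.com/sherry255/leetcode-solution | code/29-divide-two-integers.py | divide_step
-- ===== SOURCE A (Python) =====
-- def divide_step(a, b, s):
--     if (a > b):
--         q, a = divide_step(a, b << 1, s << 1)
--     else:
--         q = 0
--
--     if a >= b:
--         return (q|s), a - b
--     else:
--         return q, a
-- ===== SOURCE B (Python) =====
-- def divide_step(a, b, s):
--     # Iterative two-phase rewrite of the recursive doubling step.
--     pairs = []
--     while a > b:
--         pairs.append((b, s))
--         b <<= 1
--         s <<= 1
--     q, rem = 0, a
--     if rem >= b:
--         q |= s
--         rem -= b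
--     for bb, ss in reversed(pairs):
--         if rem >= bb:
--             q |= ss
--             rem -= bb
--     return q, rem
-- ===== Notes on version B (the rewrite author's own statement) =====
-- stated objective: alternative
-- what changed: Replaced A's recursive doubling (recurse with b<<1,s<<1, subtract while unwinding) by an explicit two-phase loop: collect the (b,s) doubling pairs iteratively, do the base subtraction, then subtract largest-first over the collected pairs in reverse.
import Mathlib
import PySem

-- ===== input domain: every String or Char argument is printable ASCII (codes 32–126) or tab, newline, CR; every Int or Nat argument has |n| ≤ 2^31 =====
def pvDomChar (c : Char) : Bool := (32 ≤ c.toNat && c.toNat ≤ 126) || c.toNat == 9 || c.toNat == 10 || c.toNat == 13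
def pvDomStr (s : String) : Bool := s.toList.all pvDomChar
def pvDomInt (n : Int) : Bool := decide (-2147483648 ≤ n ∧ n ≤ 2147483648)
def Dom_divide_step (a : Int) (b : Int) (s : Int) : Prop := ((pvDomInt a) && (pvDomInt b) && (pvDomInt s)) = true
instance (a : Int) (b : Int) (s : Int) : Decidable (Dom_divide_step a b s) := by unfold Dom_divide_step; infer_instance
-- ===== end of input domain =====

-- B replaces A's recursion by an explicit two-phase loop (collect doubling pairs, then subtract
-- largest-first); same cost, different decomposition. Return-value equivalence only; no mutation.

-- ===== PORT A =====
-- A's recursion diverges (Python RecursionError) when a > b and b ≤ 0; the fuel (64) only makes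
-- the Lean function total — inside Pre_ ∩ Dom the recursion depth is at most 33, so the fuel
-- branch is never taken there.
def pvAuxA (f : Nat) (a : Int) (b : Int) (s : Int) : Int × Int :=
  let qa : Int × Int :=
    if a > b then
      match f with
      | 0 => (0, a)                       -- fuel exhausted (unreachable inside Pre_ ∩ Dom)
      | Nat.succ f' => pvAuxA f' a (b <<< 1) (s <<< 1)
    else (0, a)
  if qa.2 ≥ b then (PySem.Int.bor qa.1 s, qa.2 - b) else qa

def divide_step (a : Int) (b : Int) (s : Int) : Int × Int := pvAuxA 64 a b s

-- ===== PORT B =====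
-- the 'while a > b' collection loop of Source B (same fuel-totalisation as A's port)
def pvCollect (f : Nat) (a : Int) (b : Int) (s : Int) : List (Int × Int) × Int × Int :=
  if a > b then
    match f with
    | 0 => ([], b, s)                     -- fuel exhausted (unreachable inside Pre_ ∩ Dom)
    | Nat.succ f' =>
      let r := pvCollect f' a (b <<< 1) (s <<< 1)
      ((b, s) :: r.1, r.2)
  else ([], b, s)

-- the conditional subtract step of Source B's second phase
def pvStep (qr : Int × Int) (p : Int × Int) : Int × Int :=
  if qr.2 ≥ p.1 then (PySem.Int.bor qr.1 p.2, qr.2 - p.1) else qr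

def divide_step_alt (a : Int) (b : Int) (s : Int) : Int × Int :=
  let r := pvCollect 64 a b s
  (r.1.reverse).foldl pvStep (pvStep (0, a) (r.2.1, r.2.2))

-- ===== PRECONDITION & SPEC =====
-- Pre_ excludes exactly the inputs where Python A never returns: with a > b and b ≤ 0 the
-- doubling recursion never terminates (RecursionError); B's while loop diverges there too.
def Pre_divide_step (a : Int) (b : Int) (s : Int) : Prop := a ≤ b ∨ 0 < b
instance (a : Int) (b : Int) (s : Int) : Decidable (Pre_divide_step a b s) := by unfold Pre_divide_step; infer_instance
def pvWitness_divide_step : Int × Int × Int := (7, 2, 1)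

def Spec_divide_step (a : Int) (b : Int) (s : Int) (out : Int × Int) : Prop := out = divide_step_alt a b s
instance (a : Int) (b : Int) (s : Int) (out : Int × Int) : Decidable (Spec_divide_step a b s out) := by unfold Spec_divide_step; infer_instance

-- ===== CLAIM (what is proved, stated in full; the proofs are below) =====
def Claim_equal_divide_step : Prop := ∀ (a : Int) (b : Int) (s : Int), Dom_divide_step a b s → Pre_divide_step a b s → Spec_divide_step a b s (divide_step a b s)

-- ===== LEMMAS AND PROOFS =====

-- the two fuelled computations agree for every fuel and every input
theorem pvAuxA_eq_collect (f : Nat) : ∀ (a b s : Int),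
    pvAuxA f a b s =
      ((pvCollect f a b s).1.reverse).foldl pvStep
        (pvStep (0, a) ((pvCollect f a b s).2.1, (pvCollect f a b s).2.2)) := by
  induction f with
  | zero =>
    intro a b s
    by_cases h : a > b <;>
      simp [pvAuxA, pvCollect, pvStep, h]
  | succ f ih =>
    intro a b s
    by_cases h : a > b
    · have := ih a (b <<< 1) (s <<< 1)
      simp only [pvAuxA, pvCollect, h, if_pos, List.reverse_cons, List.foldl_append,
        List.foldl_cons, List.foldl_nil, this]
      rfl
    · simp [pvAuxA, pvCollect, pvStep, h]

-- ===== VERDICT (by name: the statement is the Claim_ definition above) =====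
theorem divide_step_spec : Claim_equal_divide_step := by
  intro a b s _ _
  unfold Spec_divide_step divide_step divide_step_alt
  exact pvAuxA_eq_collect 64 a b s
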